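-- pv_equiv track=rewrite | github.com/KevinPCE/Trabajo-grupal-en-clase-5 | matrizestructuras.py | generar_matriz
-- ===== SOURCE A (Python) =====
-- def generar_matriz(n, m):
-- #Genera una matriz de n filas y m columnas con las siguientes condiciones:"
-- #Desarrollar un programa en Python que genere una matriz de n filas y m columnas con la
-- #siguiente estructura (8x9)
--     matriz = []
--     for i in range(n):
--          fila = []
--          if i ==   0:
--             fila.append(1)
--             for j in range(1, m):
--                 fila.append(0)
--          elif i == 1:
--             for j in range(m):
--                 fila.append(1)
--          else:
--             for j in range(m):
--                 fila.append((i) ** j)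
--          matriz.append(fila)
--     return matriz
-- ===== SOURCE B (Python) =====
-- def generar_matriz(n, m):
--     matriz = []
--     for i in range(n):
--         if i == 0:
--             matriz.append([1] + [0] * (m - 1))
--         else:
--             fila = []
--             p = 1
--             for _ in range(m):
--                 fila.append(p)
--                 p *= i
--             matriz.append(fila)
--     return matriz
-- ===== Notes on version B (the rewrite author's own statement) =====
-- stated objective: simpler
-- what changed: Row 0 is built as one list expression [1]+[0]*(m-1), and the i==1 and i>=2 branches collapse into a single running-product loop (p starts at 1, p*=i) instead of computing i**j per cell.
import Mathlib
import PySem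

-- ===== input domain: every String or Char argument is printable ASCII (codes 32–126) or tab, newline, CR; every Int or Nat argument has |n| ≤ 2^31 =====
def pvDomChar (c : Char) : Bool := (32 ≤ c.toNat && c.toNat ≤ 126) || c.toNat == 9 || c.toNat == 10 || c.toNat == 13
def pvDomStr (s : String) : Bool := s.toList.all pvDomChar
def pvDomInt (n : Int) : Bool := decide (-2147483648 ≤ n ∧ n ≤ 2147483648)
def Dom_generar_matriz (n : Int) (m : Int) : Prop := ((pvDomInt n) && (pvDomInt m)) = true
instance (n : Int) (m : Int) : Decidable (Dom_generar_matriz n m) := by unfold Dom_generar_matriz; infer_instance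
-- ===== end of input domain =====

-- B replaces the per-cell power i**j by a per-row running product and builds row 0 as one
-- list expression, collapsing A's three branches into two (objective: simpler; same return values).

-- ===== PORT A =====
def generar_matriz (n : Int) (m : Int) : List (List Int) :=
  (PySem.List.pyRange 0 n 1).foldl (fun matriz i =>
    let fila : List Int :=
      if i = 0 then
        (PySem.List.pyRange 1 m 1).foldl (fun f _ => f ++ [0]) [1]
      else if i = 1 then
        (PySem.List.pyRange 0 m 1).foldl (fun f _ => f ++ [1]) []
      else
        (PySem.List.pyRange 0 m 1).foldl (fun f j => f ++ [i ^ j.toNat]) []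
    matriz ++ [fila]) []

-- ===== PORT B =====
def generar_matriz_alt (n : Int) (m : Int) : List (List Int) :=
  (PySem.List.pyRange 0 n 1).foldl (fun matriz i =>
    if i = 0 then
      matriz ++ [1 :: List.replicate (m - 1).toNat 0]
    else
      matriz ++ [((PySem.List.pyRange 0 m 1).foldl
        (fun (st : List Int × Int) _ => (st.1 ++ [st.2], st.2 * i)) ([], 1)).1]) []

-- ===== PRECONDITION & SPEC =====
def Spec_generar_matriz (n : Int) (m : Int) (out : List (List Int)) : Prop := out = generar_matriz_alt n m
instance (n : Int) (m : Int) (out : List (List Int)) : Decidable (Spec_generar_matriz n m out) := by unfold Spec_generar_matriz; infer_instance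

-- ===== CLAIM (what is proved, stated in full; the proofs are below) =====
def Claim_equal_generar_matriz : Prop := ∀ (n : Int) (m : Int), Dom_generar_matriz n m → Spec_generar_matriz n m (generar_matriz n m)

-- ===== LEMMAS AND PROOFS =====

-- B's running-product fold, characterised: it appends p, p*i, p*i², … and ends with p*i^k.
theorem prod_fold_spec (i : Int) (k : Nat) (acc : List Int) (p : Int) :
    (List.range k).foldl (fun (st : List Int × Int) (_ : Nat) => (st.1 ++ [st.2], st.2 * i)) (acc, p)
      = (acc ++ (List.range k).map (fun j => p * i ^ j), p * i ^ k) := by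
  induction k generalizing acc p with
  | zero => simp
  | succ k ih =>
      rw [List.range_succ, List.foldl_append, ih]
      simp [pow_succ, mul_assoc]

-- the running-product row equals the powers row
theorem row_alt_eq (i : Int) (m : Int) :
    ((PySem.List.pyRange 0 m 1).foldl
        (fun (st : List Int × Int) _ => (st.1 ++ [st.2], st.2 * i)) ([], 1)).1
      = (List.range m.toNat).map (fun j => i ^ j) := by
  rw [PySem.List.pyRange_zero, List.foldl_map, prod_fold_spec]
  simp

theorem generar_matriz_spec' : ∀ (n m : Int), generar_matriz n m = generar_matriz_alt n m := by
  intro n m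
  unfold generar_matriz generar_matriz_alt
  apply PySem.List.foldl_congr_mem
  intro acc i _
  by_cases h0 : i = 0
  · -- row 0: [1] ++ (m-1) zeros = 1 :: replicate
    simp only [h0, PySem.List.foldl_append_singleton_eq_map (fun _ => (0 : Int))]
    congr 1
    simp [List.map_const', PySem.List.length_pyRange_one]
  · by_cases h1 : i = 1
    · simp only [h1, if_neg one_ne_zero,
        PySem.List.foldl_append_singleton_eq_map (fun _ => (1 : Int)), row_alt_eq]
      simp [PySem.List.pyRange_zero, Function.comp_def, List.map_const', one_pow]
    · simp only [if_neg h0, if_neg h1,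
        PySem.List.foldl_append_singleton_eq_map (fun j : Int => i ^ j.toNat), row_alt_eq]
      rw [PySem.List.pyRange_zero, List.map_map]
      simp

-- ===== VERDICT (by name: the statement is the Claim_ definition above) =====
theorem generar_matriz_spec : Claim_equal_generar_matriz := by
  intro n m _
  unfold Spec_generar_matriz
  exact generar_matriz_spec' n m
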